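-- pv_equiv track=rewrite | github.com/RiemanNClav/chatbot_cafeteria | chatbot/mensajes_automatizados/mensajes.py | generar_ticket_en_memoria
-- ===== SOURCE A (Python) =====
-- def generar_ticket_en_memoria(ticket_data, ticket_bebidas):
--     """Genera el contenido del ticket como un archivo de texto en memoria."""
--     contenido = []
--
--     # Agregar datos generales del ticket
--     for key, value in ticket_data.items():
--         contenido.append(f"{key} = {value}")
--     contenido.append("-------------------------------------")
--
--     # Clasificar los registros por tipo de producto
--     registros_bebidas = [t for t in ticket_bebidas if t['producto'] == 'bebidas']
--     registros_alimentos = [t for t in ticket_bebidas if t['producto'] == 'alimentos']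
--     registros_promociones = [t for t in ticket_bebidas if t['producto'] == 'promociones']
--
--     # Agregar registros clasificados
--     def agregar_registro(contenido, titulo, registros):
--         if registros:
--             contenido.append(f"                  {titulo}")
--             for i, ticket in enumerate(registros, start=1):
--                 contenido.append(f"      {titulo[:-1]} {i}")
--                 for key, value in ticket.items():
--                     contenido.append(f"{key} = {value}")
--             contenido.append("-------------------------------------")
--         else:
--             contenido.append(f"              No hay {titulo[:-1].lower()} registrados")
--             contenido.append("-------------------------------------")
--
--     agregar_registro(contenido, "Registro de Bebidas", registros_bebidas)
--     agregar_registro(contenido, "Registro de Alimentos", registros_alimentos)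
--     agregar_registro(contenido, "Registro de Promociones", registros_promociones)
--
--     return "\n".join(contenido)
-- ===== SOURCE B (Python) =====
-- def generar_ticket_en_memoria(ticket_data, ticket_bebidas):
--     """Igual que A, pero con una sola pasada de agrupacion por producto y
--     secciones construidas como cadenas independientes unidas al final."""
--     SEP = "-------------------------------------"
--     buckets = {'bebidas': [], 'alimentos': [], 'promociones': []}
--     for t in ticket_bebidas:
--         p = t['producto']
--         if p in buckets:
--             buckets[p].append(t)
--
--     def seccion(titulo, registros):
--         if not registros:
--             return "\n".join([f"              No hay {titulo[:-1].lower()} registrados", SEP])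
--         lineas = [f"                  {titulo}"]
--         for i, t in enumerate(registros, start=1):
--             lineas.append(f"      {titulo[:-1]} {i}")
--             lineas.extend(f"{k} = {v}" for k, v in t.items())
--         lineas.append(SEP)
--         return "\n".join(lineas)
--
--     partes = [f"{k} = {v}" for k, v in ticket_data.items()]
--     partes.append(SEP)
--     partes.append(seccion("Registro de Bebidas", buckets['bebidas']))
--     partes.append(seccion("Registro de Alimentos", buckets['alimentos']))
--     partes.append(seccion("Registro de Promociones", buckets['promociones']))
--     return "\n".join(partes)
-- ===== Notes on version B (the rewrite author's own statement) =====
-- stated objective: alternative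
-- what changed: One grouping pass over ticket_bebidas into three pre-seeded buckets replaces the three separate filtering comprehensions, and each section is built and joined as an independent string instead of mutating one shared 'contenido' list through a helper.
import Mathlib
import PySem

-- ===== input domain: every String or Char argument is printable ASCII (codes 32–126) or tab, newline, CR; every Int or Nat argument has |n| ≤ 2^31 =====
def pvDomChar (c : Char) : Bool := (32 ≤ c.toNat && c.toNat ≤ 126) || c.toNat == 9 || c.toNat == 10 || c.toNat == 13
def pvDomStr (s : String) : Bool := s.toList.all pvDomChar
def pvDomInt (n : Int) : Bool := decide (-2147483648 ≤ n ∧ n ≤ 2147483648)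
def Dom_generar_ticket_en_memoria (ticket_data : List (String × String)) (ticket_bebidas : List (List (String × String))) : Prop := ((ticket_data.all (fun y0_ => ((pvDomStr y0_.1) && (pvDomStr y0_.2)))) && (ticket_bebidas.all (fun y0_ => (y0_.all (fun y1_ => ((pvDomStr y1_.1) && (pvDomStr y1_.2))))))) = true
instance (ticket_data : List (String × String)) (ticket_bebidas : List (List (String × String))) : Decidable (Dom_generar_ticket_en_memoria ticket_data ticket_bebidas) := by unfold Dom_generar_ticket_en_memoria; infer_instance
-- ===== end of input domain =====

-- B replaces A's three filtering passes by one grouping pass into three buckets and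
-- builds each section as an independent joined string (alternative decomposition; return value only).

-- ===== PORT A =====
def pvSep : String := "-------------------------------------"

-- A's inner helper agregar_registro: mutates 'contenido', ported as returning the new list.
-- t['producto'] (a KeyError when the key is absent) is ported as get? compared to some _: exact under Pre_.
def pvAgregarRegistro (contenido : List String) (titulo : String)
    (registros : List (List (String × String))) : List String :=
  if registros ≠ [] then
    let c := contenido ++ ["                  " ++ titulo]
    let c := (PySem.List.enumerate registros 1).foldl (fun acc p =>
        p.2.foldl (fun a kv => a ++ [kv.1 ++ " = " ++ kv.2])
          (acc ++ ["      " ++ PySem.Str.slice titulo none (some (-1)) ++ " " ++ PySem.Int.toStr p.1])) c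
    c ++ [pvSep]
  else
    contenido ++ ["              No hay " ++ PySem.Str.lower (PySem.Str.slice titulo none (some (-1))) ++ " registrados", pvSep]

def generar_ticket_en_memoria (ticket_data : List (String × String)) (ticket_bebidas : List (List (String × String))) : String :=
  let contenido : List String := ticket_data.foldl (fun acc kv => acc ++ [kv.1 ++ " = " ++ kv.2]) []
  let contenido := contenido ++ [pvSep]
  let registros_bebidas := ticket_bebidas.filter (fun t => (PySem.Dict.mk t).get? "producto" == some "bebidas")
  let registros_alimentos := ticket_bebidas.filter (fun t => (PySem.Dict.mk t).get? "producto" == some "alimentos")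
  let registros_promociones := ticket_bebidas.filter (fun t => (PySem.Dict.mk t).get? "producto" == some "promociones")
  let contenido := pvAgregarRegistro contenido "Registro de Bebidas" registros_bebidas
  let contenido := pvAgregarRegistro contenido "Registro de Alimentos" registros_alimentos
  let contenido := pvAgregarRegistro contenido "Registro de Promociones" registros_promociones
  PySem.Str.join "\n" contenido

-- ===== PORT B =====
def pvSepB : String := "-------------------------------------"

-- Source B's seccion: one section rendered directly to a string
def pvSeccion (titulo : String) (registros : List (List (String × String))) : String :=
  if registros = [] then
    PySem.Str.join "\n" ["              No hay " ++ PySem.Str.lower (PySem.Str.slice titulo none (some (-1))) ++ " registrados", pvSepB]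
  else
    let lineas : List String := ["                  " ++ titulo]
    let lineas := (PySem.List.enumerate registros 1).foldl (fun ls p =>
        ls ++ ("      " ++ PySem.Str.slice titulo none (some (-1)) ++ " " ++ PySem.Int.toStr p.1)
           :: p.2.map (fun kv => kv.1 ++ " = " ++ kv.2)) lineas
    PySem.Str.join "\n" (lineas ++ [pvSepB])

-- Source B's buckets dict with the three fixed literal keys, ported as a triple (bebidas, alimentos, promociones)
def pvBuckets (ticket_bebidas : List (List (String × String))) :
    List (List (String × String)) × List (List (String × String)) × List (List (String × String)) :=
  ticket_bebidas.foldl (fun b t =>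
    let p? := (PySem.Dict.mk t).get? "producto"
    if p? == some "bebidas" then (b.1 ++ [t], b.2.1, b.2.2)
    else if p? == some "alimentos" then (b.1, b.2.1 ++ [t], b.2.2)
    else if p? == some "promociones" then (b.1, b.2.1, b.2.2 ++ [t])
    else b) ([], [], [])

def generar_ticket_en_memoria_alt (ticket_data : List (String × String)) (ticket_bebidas : List (List (String × String))) : String :=
  let buckets := pvBuckets ticket_bebidas
  let partes : List String := ticket_data.map (fun kv => kv.1 ++ " = " ++ kv.2)
  let partes := partes ++ [pvSepB]
  let partes := partes ++ [pvSeccion "Registro de Bebidas" buckets.1]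
  let partes := partes ++ [pvSeccion "Registro de Alimentos" buckets.2.1]
  let partes := partes ++ [pvSeccion "Registro de Promociones" buckets.2.2]
  PySem.Str.join "\n" partes

-- ===== PRECONDITION & SPEC =====
-- Pre_ excludes exactly the inputs on which A raises KeyError: a record in ticket_bebidas without a 'producto' key.
def Pre_generar_ticket_en_memoria (ticket_data : List (String × String)) (ticket_bebidas : List (List (String × String))) : Prop :=
  ∀ t ∈ ticket_bebidas, "producto" ∈ t.map Prod.fst
instance (ticket_data : List (String × String)) (ticket_bebidas : List (List (String × String))) : Decidable (Pre_generar_ticket_en_memoria ticket_data ticket_bebidas) := by unfold Pre_generar_ticket_en_memoria; infer_instance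

def pvWitness_generar_ticket_en_memoria : (List (String × String)) × (List (List (String × String))) :=
  ([("Fecha", "2024-01-01")], [[("producto", "bebidas"), ("nombre", "cafe")], [("producto", "alimentos")]])

def Spec_generar_ticket_en_memoria (ticket_data : List (String × String)) (ticket_bebidas : List (List (String × String))) (out : String) : Prop := out = generar_ticket_en_memoria_alt ticket_data ticket_bebidas
instance (ticket_data : List (String × String)) (ticket_bebidas : List (List (String × String))) (out : String) : Decidable (Spec_generar_ticket_en_memoria ticket_data ticket_bebidas out) := by unfold Spec_generar_ticket_en_memoria; infer_instance

-- ===== CLAIM (what is proved, stated in full; the proofs are below) =====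
def Claim_equal_generar_ticket_en_memoria : Prop := ∀ (ticket_data : List (String × String)) (ticket_bebidas : List (List (String × String))), Dom_generar_ticket_en_memoria ticket_data ticket_bebidas → Pre_generar_ticket_en_memoria ticket_data ticket_bebidas → Spec_generar_ticket_en_memoria ticket_data ticket_bebidas (generar_ticket_en_memoria ticket_data ticket_bebidas)

-- ===== LEMMAS AND PROOFS =====

-- the lines of one section, as both ports produce them
def pvSecLines (titulo : String) (registros : List (List (String × String))) : List String :=
  if registros = [] then
    ["              No hay " ++ PySem.Str.lower (PySem.Str.slice titulo none (some (-1))) ++ " registrados", pvSep]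
  else
    ("                  " ++ titulo) ::
      ((PySem.List.enumerate registros 1).flatMap (fun p =>
        ("      " ++ PySem.Str.slice titulo none (some (-1)) ++ " " ++ PySem.Int.toStr p.1)
          :: p.2.map (fun kv => kv.1 ++ " = " ++ kv.2))
      ++ [pvSep])

lemma pvSecLines_ne_nil (t : String) (r : List (List (String × String))) : pvSecLines t r ≠ [] := by
  unfold pvSecLines; split <;> simp

lemma pv_flatMap_singleton {α β : Type} (f : α → β) (l : List α) :
    l.flatMap (fun x => [f x]) = l.map f := by
  induction l with
  | nil => rfl
  | cons a l ih => simp [ih]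

lemma pv_flatten_map_singleton {α β : Type} (f : α → β) (l : List α) :
    (l.map (fun x => [f x])).flatten = l.map f := by
  induction l with
  | nil => rfl
  | cons a l ih => simp [ih]

lemma pv_foldl_outer (l : List (Int × List (String × String))) (c : List String) (hdr : Int × List (String × String) → String) :
    l.foldl (fun acc p =>
        p.2.foldl (fun a kv => a ++ [kv.1 ++ " = " ++ kv.2]) (acc ++ [hdr p])) c
      = c ++ l.flatMap (fun p => hdr p :: p.2.map (fun kv => kv.1 ++ " = " ++ kv.2)) := by
  induction l generalizing c with
  | nil => simp
  | cons p l ih =>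
    simp only [List.foldl_cons, List.flatMap_cons]
    rw [PySem.List.foldl_append_eq_flatMap, ih, pv_flatMap_singleton]
    simp [List.append_assoc]

lemma pvAgregar_eq (c : List String) (t : String) (r : List (List (String × String))) :
    pvAgregarRegistro c t r = c ++ pvSecLines t r := by
  unfold pvAgregarRegistro pvSecLines
  by_cases h : r = []
  · simp [h]
  · rw [if_pos h, if_neg h]
    dsimp only
    rw [pv_foldl_outer]
    simp [List.append_assoc]

lemma pvSeccion_eq (t : String) (r : List (List (String × String))) :
    pvSeccion t r = PySem.Str.join "\n" (pvSecLines t r) := by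
  unfold pvSeccion pvSecLines
  by_cases h : r = []
  · simp [h, pvSep, pvSepB]
  · rw [if_neg h, if_neg h]
    dsimp only
    rw [PySem.List.foldl_append_eq_flatMap]
    simp [pvSep, pvSepB]

lemma pvBuckets_go (l : List (List (String × String)))
    (b1 b2 b3 : List (List (String × String))) :
    l.foldl (fun b t =>
      let p? := (PySem.Dict.mk t).get? "producto"
      if p? == some "bebidas" then (b.1 ++ [t], b.2.1, b.2.2)
      else if p? == some "alimentos" then (b.1, b.2.1 ++ [t], b.2.2)
      else if p? == some "promociones" then (b.1, b.2.1, b.2.2 ++ [t])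
      else b) (b1, b2, b3)
    = (b1 ++ l.filter (fun t => (PySem.Dict.mk t).get? "producto" == some "bebidas"),
       b2 ++ l.filter (fun t => (PySem.Dict.mk t).get? "producto" == some "alimentos"),
       b3 ++ l.filter (fun t => (PySem.Dict.mk t).get? "producto" == some "promociones")) := by
  induction l generalizing b1 b2 b3 with
  | nil => simp
  | cons t l ih =>
    simp only [List.foldl_cons]
    split_ifs with hb ha hp
    · rw [ih]; simp [eq_of_beq hb]
    · rw [ih]; simp [eq_of_beq ha]
    · rw [ih]; simp [eq_of_beq hp]
    · rw [ih]; simp [hb, ha, hp]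

lemma pvBuckets_eq (tb : List (List (String × String))) :
    pvBuckets tb
    = (tb.filter (fun t => (PySem.Dict.mk t).get? "producto" == some "bebidas"),
       tb.filter (fun t => (PySem.Dict.mk t).get? "producto" == some "alimentos"),
       tb.filter (fun t => (PySem.Dict.mk t).get? "producto" == some "promociones")) := by
  unfold pvBuckets
  rw [pvBuckets_go]
  simp

lemma pv_join_append (s : List Char) (v w : List (List Char)) (hv : v ≠ []) (hw : w ≠ []) :
    PySem.Chars.join s (v ++ w) = PySem.Chars.join s v ++ s ++ PySem.Chars.join s w := by
  induction v with
  | nil => exact absurd rfl hv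
  | cons a v' ih =>
    cases v' with
    | nil =>
      cases w with
      | nil => exact absurd rfl hw
      | cons b w' => simp [PySem.Chars.join_singleton, PySem.Chars.join_cons_cons]
    | cons a2 v'' =>
      rw [List.cons_append, List.cons_append, PySem.Chars.join_cons_cons,
          ← List.cons_append, ih (by simp), PySem.Chars.join_cons_cons]
      simp [List.append_assoc]

lemma pv_join_map_join (s : List Char) (ps : List (List (List Char)))
    (hne : ∀ p ∈ ps, p ≠ []) (hps : ps ≠ []) :
    PySem.Chars.join s (ps.map (PySem.Chars.join s)) = PySem.Chars.join s ps.flatten := by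
  induction ps with
  | nil => exact absurd rfl hps
  | cons p ps' ih =>
    cases ps' with
    | nil => simp [PySem.Chars.join_singleton]
    | cons p2 rest =>
      have hp : p ≠ [] := hne p (by simp)
      have hflat : (p2 :: rest).flatten ≠ [] := by
        have hp2 : p2 ≠ [] := hne p2 (by simp)
        simp only [List.flatten_cons]
        intro h
        exact hp2 (List.append_eq_nil_iff.mp h).1
      rw [List.map_cons, List.map_cons, PySem.Chars.join_cons_cons, ← List.map_cons,
          ih (fun q hq => hne q (by simp [hq])) (by simp)]
      have hfc : (p :: p2 :: rest).flatten = p ++ (p2 :: rest).flatten := rfl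
      rw [hfc, pv_join_append s p (p2 :: rest).flatten hp hflat]

-- ===== VERDICT (by name: the statement is the Claim_ definition above) =====
theorem generar_ticket_en_memoria_spec : Claim_equal_generar_ticket_en_memoria := by
  intro td tb _ _
  unfold Spec_generar_ticket_en_memoria
  unfold generar_ticket_en_memoria generar_ticket_en_memoria_alt
  rw [pvBuckets_eq]
  simp only [pvAgregar_eq, pvSeccion_eq]
  rw [PySem.List.foldl_append_eq_flatMap, pv_flatMap_singleton]
  rw [← String.toList_inj, PySem.Str.toList_join, PySem.Str.toList_join]
  simp only [List.nil_append, show pvSepB = pvSep from rfl, List.append_assoc, List.cons_append]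
  set L1 := pvSecLines "Registro de Bebidas" (tb.filter (fun t => (PySem.Dict.mk t).get? "producto" == some "bebidas")) with hL1
  set L2 := pvSecLines "Registro de Alimentos" (tb.filter (fun t => (PySem.Dict.mk t).get? "producto" == some "alimentos")) with hL2
  set L3 := pvSecLines "Registro de Promociones" (tb.filter (fun t => (PySem.Dict.mk t).get? "producto" == some "promociones")) with hL3
  set M := td.map (fun kv => kv.1 ++ " = " ++ kv.2) with hM
  have key := pv_join_map_join "\n".toList
      (((M ++ [pvSep]).map (fun x => [x.toList])) ++ [L1.map String.toList, L2.map String.toList, L3.map String.toList])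
      (by
        intro p hp
        rcases List.mem_append.mp hp with h | h
        · rcases List.mem_map.mp h with ⟨x, _, rfl⟩; simp
        · simp only [List.mem_cons, List.not_mem_nil, or_false] at h
          rcases h with rfl | rfl | rfl
          · simp [hL1, List.map_eq_nil_iff, pvSecLines_ne_nil]
          · simp [hL2, List.map_eq_nil_iff, pvSecLines_ne_nil]
          · simp [hL3, List.map_eq_nil_iff, pvSecLines_ne_nil])
      (by simp)
  have lhs_eq : List.map String.toList (M ++ pvSep :: (L1 ++ (L2 ++ L3)))
      = (((M ++ [pvSep]).map (fun x => [x.toList])) ++ [L1.map String.toList, L2.map String.toList, L3.map String.toList]).flatten := by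
    simp [pv_flatten_map_singleton]
  have rhs_eq : List.map String.toList (M ++ pvSep :: [PySem.Str.join "\n" L1, PySem.Str.join "\n" L2, PySem.Str.join "\n" L3])
      = (((M ++ [pvSep]).map (fun x => [x.toList])) ++ [L1.map String.toList, L2.map String.toList, L3.map String.toList]).map (PySem.Chars.join "\n".toList) := by
    simp [PySem.Str.toList_join, PySem.Chars.join_singleton, Function.comp]
  rw [lhs_eq, rhs_eq, key]
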